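-- pv_equiv track=rewrite | github.com/ericmey/musubi | src/musubi/auth/scopes.py | _namespace_matches
-- ===== SOURCE A (Python) =====
-- def _namespace_matches(pattern: str, namespace: str) -> bool:
--     if pattern == "**":
--         return True
--
--     pattern_parts = pattern.split("/")
--     namespace_parts = namespace.split("/")
--     if len(pattern_parts) != len(namespace_parts):
--         return False
--
--     return all(
--         pattern_part == "*" or pattern_part == namespace_part
--         for pattern_part, namespace_part in zip(pattern_parts, namespace_parts, strict=True)
--     )
-- ===== SOURCE B (Python) =====
-- def _take_segment(s):
--     for i in range(len(s)):
--         if s[i] == "/":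
--             return s[:i], True, s[i + 1:]
--     return s, False, ""
--
--
-- def _namespace_matches(pattern: str, namespace: str) -> bool:
--     if pattern == "**":
--         return True
--     p, n = pattern, namespace
--     while True:
--         ps, p_more, p = _take_segment(p)
--         ns, n_more, n = _take_segment(n)
--         if ps != "*" and ps != ns:
--             return False
--         if not p_more and not n_more:
--             return True
--         if p_more != n_more:
--             return False
-- ===== Notes on version B (the rewrite author's own statement) =====
-- stated objective: alternative
-- what changed: B replaces A's split-both-strings-into-part-lists-then-compare with a streaming two-pointer scanner that peels one '/'-delimited segment at a time from each string and stops at the first mismatching segment, never materialising the part lists.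
import Mathlib
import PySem

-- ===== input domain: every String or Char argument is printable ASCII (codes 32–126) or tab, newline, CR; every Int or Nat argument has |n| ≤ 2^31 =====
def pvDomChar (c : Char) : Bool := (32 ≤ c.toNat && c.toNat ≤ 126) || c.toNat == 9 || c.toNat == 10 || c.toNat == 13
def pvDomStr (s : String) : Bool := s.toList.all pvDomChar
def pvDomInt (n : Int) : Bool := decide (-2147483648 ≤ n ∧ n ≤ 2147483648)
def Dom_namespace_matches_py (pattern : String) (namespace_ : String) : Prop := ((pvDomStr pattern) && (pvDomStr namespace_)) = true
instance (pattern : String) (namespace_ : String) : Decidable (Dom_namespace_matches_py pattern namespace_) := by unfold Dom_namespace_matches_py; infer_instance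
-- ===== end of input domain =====

-- B replaces A's split-both-strings-then-compare-part-lists with a streaming scanner that
-- peels one '/'-delimited segment at a time from each string (alternative decomposition, no list of parts built).

-- ===== PORT A =====
def namespace_matches_py (pattern : String) (namespace_ : String) : Bool :=
  if pattern == "**" then true
  else
    let pattern_parts := PySem.Chars.splitOn pattern.toList ['/']
    let namespace_parts := PySem.Chars.splitOn namespace_.toList ['/']
    if pattern_parts.length ≠ namespace_parts.length then false
    else (pattern_parts.zip namespace_parts).all fun pp => pp.1 == ['*'] || pp.1 == pp.2

-- ===== PORT B =====
-- _take_segment: scan for the first '/'; return (segment before it, whether a '/' was found, rest after it)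
def takeSegment : List Char → List Char × Bool × List Char
  | [] => ([], false, [])
  | c :: r =>
    if c = '/' then ([], true, r)
    else
      let t := takeSegment r
      (c :: t.1, t.2.1, t.2.2)

-- termination fact for the while loop below (cited in decreasing_by)
theorem takeSegment_lt : ∀ (s : List Char), (takeSegment s).2.1 = true → (takeSegment s).2.2.length < s.length := by
  intro s
  induction s with
  | nil => simp [takeSegment]
  | cons c r ih =>
    by_cases hc : c = '/'
    · simp [takeSegment, hc]
    · simp only [takeSegment, if_neg hc]
      intro h
      have := ih h
      simpa using Nat.lt_succ_of_lt this

-- the while loop of B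
def matchSegments (p n : List Char) : Bool :=
  let t := takeSegment p
  let u := takeSegment n
  if t.1 ≠ ['*'] ∧ t.1 ≠ u.1 then false
  else if t.2.1 = false ∧ u.2.1 = false then true
  else if t.2.1 ≠ u.2.1 then false
  else matchSegments t.2.2 u.2.2
termination_by p.length
decreasing_by
  rename_i _ h2 h3
  have hp : (takeSegment p).2.1 = true := by
    cases hb : (takeSegment p).2.1 with
    | true => rfl
    | false =>
      cases hb' : (takeSegment n).2.1 with
      | false => exact absurd ⟨hb, hb'⟩ h2
      | true => exact absurd (by rw [hb, hb']; simp) h3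
  exact takeSegment_lt p hp

def namespace_matches_py_alt (pattern : String) (namespace_ : String) : Bool :=
  if pattern == "**" then true
  else matchSegments pattern.toList namespace_.toList

-- ===== PRECONDITION & SPEC =====
def Spec_namespace_matches_py (pattern : String) (namespace_ : String) (out : Bool) : Prop := out = namespace_matches_py_alt pattern namespace_
instance (pattern : String) (namespace_ : String) (out : Bool) : Decidable (Spec_namespace_matches_py pattern namespace_ out) := by unfold Spec_namespace_matches_py; infer_instance

-- ===== CLAIM (what is proved, stated in full; the proofs are below) =====
def Claim_equal_namespace_matches_py : Prop := ∀ (pattern : String) (namespace_ : String), Dom_namespace_matches_py pattern namespace_ → Spec_namespace_matches_py pattern namespace_ (namespace_matches_py pattern namespace_)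

-- ===== LEMMAS AND PROOFS =====

-- the segment list that splitOn produces, phrased through takeSegment
def segs (l : List Char) : List (List Char) :=
  let t := takeSegment l
  if h : t.2.1 = true then t.1 :: segs t.2.2 else [t.1]
termination_by l.length
decreasing_by exact takeSegment_lt l h

-- A's part-list check, as a function of the two part lists
def matchList (pl nl : List (List Char)) : Bool :=
  if pl.length ≠ nl.length then false
  else (pl.zip nl).all fun pp => pp.1 == ['*'] || pp.1 == pp.2

theorem segs_eq (l : List Char) :
    segs l = (takeSegment l).1 ::
      (if (takeSegment l).2.1 = true then segs (takeSegment l).2.2 else []) := by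
  rw [segs]
  by_cases h : (takeSegment l).2.1 = true <;> simp [h]

theorem segs_ne_nil (l : List Char) : segs l ≠ [] := by
  rw [segs_eq]; simp

theorem segs_nil : segs [] = [[]] := by
  rw [segs_eq]; simp [takeSegment]

theorem segs_slash (r : List Char) : segs ('/' :: r) = [] :: segs r := by
  rw [segs_eq, segs_eq r]
  simp [takeSegment]
  exact segs_eq r

theorem segs_cons (c : Char) (r : List Char) (hc : c ≠ '/') :
    segs (c :: r) = (segs r).modifyHead (c :: ·) := by
  rw [segs_eq, segs_eq r]
  simp [takeSegment, hc, List.modifyHead]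

theorem go_spec : ∀ (fuel : Nat) (l cur : List Char) (acc : List (List Char)), l.length ≤ fuel →
    PySem.Chars.splitOn.go ['/'] fuel l cur acc = acc.reverse ++ (segs l).modifyHead (cur.reverse ++ ·) := by
  intro fuel
  induction fuel with
  | zero =>
    intro l cur acc hl
    have : l = [] := by cases l <;> simp at hl ⊢
    subst this
    simp [PySem.Chars.splitOn.go, segs_nil]
  | succ fuel ih =>
    intro l cur acc hl
    cases l with
    | nil => simp [PySem.Chars.splitOn.go, segs_nil]
    | cons c rest =>
      by_cases hc : c = '/'
      · subst hc
        have hpre : (['/'].isPrefixOf ('/' :: rest)) = true := by simp [List.isPrefixOf]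
        simp only [PySem.Chars.splitOn.go, hpre, if_pos, List.length_singleton,
          List.drop_succ_cons, List.drop_zero]
        rw [ih rest [] (cur.reverse :: acc) (by simpa using Nat.le_of_succ_le_succ (by simpa using hl))]
        rw [segs_slash]
        cases segs rest <;> simp
      · have hpre : (['/'].isPrefixOf (c :: rest)) = false := by
          simp [List.isPrefixOf]
          exact fun h => hc h.symm
        simp only [PySem.Chars.splitOn.go, hpre]
        rw [ih rest (c :: cur) acc (by simpa using Nat.le_of_succ_le_succ (by simpa using hl))]
        rw [segs_cons c rest hc]
        cases hs : segs rest with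
        | nil => exact absurd hs (segs_ne_nil rest)
        | cons h t => simp

theorem splitOn_slash (l : List Char) : PySem.Chars.splitOn l ['/'] = segs l := by
  unfold PySem.Chars.splitOn
  rw [go_spec (l.length + 1) l [] [] (by omega)]
  cases hs : segs l with
  | nil => exact absurd hs (segs_ne_nil l)
  | cons h t => simp

theorem matchList_cons (a b : List Char) (as bs : List (List Char)) :
    matchList (a :: as) (b :: bs) = ((a == ['*'] || a == b) && matchList as bs) := by
  by_cases hlen : as.length = bs.length
  · simp [matchList, hlen]
  · simp [matchList, hlen]

theorem matchList_nil_left (bs : List (List Char)) (h : bs ≠ []) : matchList [] bs = false := by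
  cases bs with
  | nil => exact absurd rfl h
  | cons b bs' => simp [matchList]

theorem matchList_nil_right (as : List (List Char)) (h : as ≠ []) : matchList as [] = false := by
  cases as with
  | nil => exact absurd rfl h
  | cons a as' => simp [matchList]

theorem matchList_nil_nil : matchList [] [] = true := by simp [matchList]

theorem matchSegments_eq (p n : List Char) : matchSegments p n = matchList (segs p) (segs n) := by
  generalize hk : p.length = k
  induction k using Nat.strong_induction_on generalizing p n with
  | _ k ih =>
    subst hk
    rcases hP : takeSegment p with ⟨ps, pm, pr⟩
    rcases hN : takeSegment n with ⟨ns, nm, nr⟩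
    have hprlt : pm = true → pr.length < p.length := by
      intro h
      have := takeSegment_lt p (by rw [hP]; exact h)
      rwa [hP] at this
    rw [matchSegments, segs_eq p, segs_eq n, hP, hN]
    dsimp only
    cases pm <;> cases nm <;> by_cases hh : ps ≠ ['*'] ∧ ps ≠ ns
    · -- false false, clash
      simp [hh, matchList_cons, matchList_nil_nil]
    · -- false false, ok
      have hok : (ps == ['*'] || ps == ns) = true := by
        rcases not_and_or.mp hh with h | h <;> simp only [not_not] at h <;> simp [h]
      simp [hh, matchList_cons, matchList_nil_nil, hok]
    · -- false true, clash
      simp [hh, matchList_cons, matchList_nil_left _ (segs_ne_nil nr)]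
    · -- false true, ok
      simp [hh, matchList_cons, matchList_nil_left _ (segs_ne_nil nr)]
    · -- true false, clash
      simp [hh, matchList_cons, matchList_nil_right _ (segs_ne_nil pr)]
    · -- true false, ok
      simp [hh, matchList_cons, matchList_nil_right _ (segs_ne_nil pr)]
    · -- true true, clash
      simp [hh, matchList_cons]
    · -- true true, ok
      have hok : (ps == ['*'] || ps == ns) = true := by
        rcases not_and_or.mp hh with h | h <;> simp only [not_not] at h <;> simp [h]
      have hrec := ih pr.length (hprlt rfl) pr nr rfl
      simp [hh, matchList_cons, hok, hrec]

-- ===== VERDICT (by name: the statement is the Claim_ definition above) =====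
theorem namespace_matches_py_spec : Claim_equal_namespace_matches_py := by
  intro pattern namespace_ _
  unfold Spec_namespace_matches_py namespace_matches_py namespace_matches_py_alt
  by_cases h : pattern == "**"
  · simp [h]
  · simp only [h, Bool.false_eq_true, if_false]
    rw [splitOn_slash, splitOn_slash, matchSegments_eq]
    rfl
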